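-- pv_equiv track=rewrite | github.com/lq1217/toy-vlc | ook_manchester.py | cal_check_sum
-- ===== SOURCE A (Python) =====
-- def cal_check_sum(x):
--     i = 0
--     check = 0
--     while i < 4:
--         check ^= (x & 0x000f)
--         x >>= 4
--         i += 1
--
--     return check
-- ===== SOURCE B (Python) =====
-- def cal_check_sum(x):
--     t = x ^ (x >> 8)
--     t ^= t >> 4
--     return t & 0xF
-- ===== Notes on version B (the rewrite author's own statement) =====
-- stated objective: alternative
-- what changed: Replaces the four-step mask-and-shift loop with a branch-free SWAR fold: xor-folding the high byte onto the low byte and then the high nibble onto the low nibble, masking to one nibble.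
import Mathlib
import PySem

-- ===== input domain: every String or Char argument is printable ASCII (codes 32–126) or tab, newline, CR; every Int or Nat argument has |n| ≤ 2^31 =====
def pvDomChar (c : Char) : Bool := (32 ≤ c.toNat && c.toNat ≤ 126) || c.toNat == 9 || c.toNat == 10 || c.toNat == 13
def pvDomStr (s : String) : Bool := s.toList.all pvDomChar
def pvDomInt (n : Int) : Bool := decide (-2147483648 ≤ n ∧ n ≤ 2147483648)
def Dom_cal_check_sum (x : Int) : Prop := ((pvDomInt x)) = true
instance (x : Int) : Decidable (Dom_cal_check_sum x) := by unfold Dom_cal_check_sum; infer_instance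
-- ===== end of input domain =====

-- B replaces A's four-iteration nibble loop by a loop-free SWAR xor-fold; same result for every int.

-- ===== PORT A =====
-- while i < 4: check ^= x & 0xf; x >>= 4; i += 1
def calLoop (i : Nat) (check : Int) (x : Int) : Int :=
  if i < 4 then
    calLoop (i + 1) (PySem.Int.bxor check (PySem.Int.band x 15)) (x >>> (4 : Nat))
  else check
termination_by 4 - i

def cal_check_sum (x : Int) : Int := calLoop 0 0 x

-- ===== PORT B =====
def cal_check_sum_alt (x : Int) : Int :=
  let t := PySem.Int.bxor x (x >>> (8 : Nat))
  let t2 := PySem.Int.bxor t (t >>> (4 : Nat))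
  PySem.Int.band t2 15

-- ===== PRECONDITION & SPEC =====
def Spec_cal_check_sum (x : Int) (out : Int) : Prop := out = cal_check_sum_alt x
instance (x : Int) (out : Int) : Decidable (Spec_cal_check_sum x out) := by unfold Spec_cal_check_sum; infer_instance

-- ===== CLAIM (what is proved, stated in full; the proofs are below) =====
def Claim_equal_cal_check_sum : Prop := ∀ (x : Int), Dom_cal_check_sum x → Spec_cal_check_sum x (cal_check_sum x)

-- ===== LEMMAS AND PROOFS =====

-- low nibble of an Int, as a Nat
def nib (y : Int) : Nat := (y % 16).toNat

theorem nat_mod16 (n : Nat) : n % 16 = n &&& 15 := by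
  have h := Nat.and_two_pow_sub_one_eq_mod n 4
  norm_num at h
  omega

theorem natNib (p q : Nat) : (p ^^^ q) % 16 = p % 16 ^^^ q % 16 := by
  rw [nat_mod16, nat_mod16, nat_mod16, Nat.and_xor_distrib_right]

theorem nib_cast (n : Nat) : nib (↑n) = n % 16 := by unfold nib; omega

theorem nib_negSucc (n : Nat) : nib (-(↑n) - 1) = 15 - n % 16 := by unfold nib; omega

theorem sub_xor_lemma : ∀ p < 16, ∀ q < 16, 15 - (p ^^^ q) = p ^^^ (15 - q) := by decide

theorem sub_xor_lemma' : ∀ p < 16, ∀ q < 16, 15 - (p ^^^ q) = (15 - p) ^^^ q := by decide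

theorem neg_neg_xor_lemma : ∀ p < 16, ∀ q < 16, p ^^^ q = (15 - p) ^^^ (15 - q) := by decide

-- canonical forms
theorem toNat_form_pos (y : Int) (h : 0 ≤ y) : y = ↑y.toNat := by omega

theorem toNat_form_neg (y : Int) (h : ¬ 0 ≤ y) : y = -↑((-y - 1).toNat) - 1 := by omega

theorem shiftRight_cast (n k : Nat) : ((↑n : Int) >>> k) = ↑(n >>> k) := rfl

theorem shiftRight_negSucc (n k : Nat) : ((-↑n - 1 : Int) >>> k) = -↑(n >>> k) - 1 := by
  rw [show (-(↑n) - 1 : Int) = Int.negSucc n by rw [Int.negSucc_eq]; ring,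
      show (-(↑(n >>> k)) - 1 : Int) = Int.negSucc (n >>> k) by rw [Int.negSucc_eq]; ring]
  rfl

theorem bxor_cast_negSucc (m n : Nat) :
    PySem.Int.bxor (↑m) (-↑n - 1) = -↑(m ^^^ n) - 1 := by
  unfold PySem.Int.bxor
  have e1 : ((↑m : Int)).toNat = m := by omega
  have e2 : (-(-(↑n : Int) - 1) - 1).toNat = n := by omega
  split_ifs with h1 h2 <;> first | omega | rw [e1, e2]

theorem bxor_negSucc_cast (m n : Nat) :
    PySem.Int.bxor (-↑m - 1) (↑n) = -↑(m ^^^ n) - 1 := by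
  unfold PySem.Int.bxor
  have e1 : (-(-(↑m : Int) - 1) - 1).toNat = m := by omega
  have e2 : ((↑n : Int)).toNat = n := by omega
  split_ifs with h1 h2 <;> first | omega | rw [e1, e2]

theorem bxor_negSucc_negSucc (m n : Nat) :
    PySem.Int.bxor (-↑m - 1) (-↑n - 1) = ↑(m ^^^ n) := by
  unfold PySem.Int.bxor
  have e1 : (-(-(↑m : Int) - 1) - 1).toNat = m := by omega
  have e2 : (-(-(↑n : Int) - 1) - 1).toNat = n := by omega
  split_ifs with h1 h2 <;> first | omega | rw [e1, e2]

-- mask: y & 15-- mask: y & 15 = low nibble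
theorem band15 (y : Int) : PySem.Int.band y 15 = ↑(nib y) := by
  unfold PySem.Int.band
  split_ifs with h1 h2
  · rw [show ((15:Int)).toNat = 15 from rfl, ← nat_mod16]
    unfold nib; omega
  · omega
  · rw [show ((15:Int)).toNat = 15 from rfl, Nat.and_comm, ← nat_mod16]
    unfold nib; omega
  · omega

-- xor distributes onto the low nibble
theorem nib_bxor (a b : Int) : nib (PySem.Int.bxor a b) = nib a ^^^ nib b := by
  by_cases h1 : 0 ≤ a <;> by_cases h2 : 0 ≤ b
  · rw [toNat_form_pos a h1, toNat_form_pos b h2, PySem.Int.bxor_natCast,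
        nib_cast, nib_cast, nib_cast, natNib]
  · rw [toNat_form_pos a h1, toNat_form_neg b h2, bxor_cast_negSucc,
        nib_negSucc, nib_cast, nib_negSucc, natNib]
    exact sub_xor_lemma _ (by omega) _ (by omega)
  · rw [toNat_form_neg a h1, toNat_form_pos b h2, bxor_negSucc_cast,
        nib_negSucc, nib_negSucc, nib_cast, natNib]
    exact sub_xor_lemma' _ (by omega) _ (by omega)
  · rw [toNat_form_neg a h1, toNat_form_neg b h2, bxor_negSucc_negSucc,
        nib_cast, nib_negSucc, nib_negSucc, natNib]
    exact neg_neg_xor_lemma _ (by omega) _ (by omega)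

-- shift distributes over bxor
theorem natShiftXor (m n k : Nat) : (m ^^^ n) >>> k = m >>> k ^^^ n >>> k :=
  Nat.eq_of_testBit_eq fun i => by simp [Nat.testBit_shiftRight, Nat.testBit_xor]

theorem shift_bxor (a b : Int) (k : Nat) :
    (PySem.Int.bxor a b) >>> k = PySem.Int.bxor (a >>> k) (b >>> k) := by
  by_cases h1 : 0 ≤ a <;> by_cases h2 : 0 ≤ b
  · rw [toNat_form_pos a h1, toNat_form_pos b h2, PySem.Int.bxor_natCast,
        shiftRight_cast, shiftRight_cast, shiftRight_cast, PySem.Int.bxor_natCast, natShiftXor]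
  · rw [toNat_form_pos a h1, toNat_form_neg b h2, bxor_cast_negSucc,
        shiftRight_negSucc, shiftRight_cast, shiftRight_negSucc, bxor_cast_negSucc, natShiftXor]
  · rw [toNat_form_neg a h1, toNat_form_pos b h2, bxor_negSucc_cast,
        shiftRight_negSucc, shiftRight_negSucc, shiftRight_cast, bxor_negSucc_cast, natShiftXor]
  · rw [toNat_form_neg a h1, toNat_form_neg b h2, bxor_negSucc_negSucc,
        shiftRight_cast, shiftRight_negSucc, shiftRight_negSucc, bxor_negSucc_negSucc, natShiftXor]

theorem shift_add (x : Int) (m n : Nat) : (x >>> m) >>> n = x >>> (m + n) := by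
  by_cases h : 0 ≤ x
  · rw [toNat_form_pos x h, shiftRight_cast, shiftRight_cast, shiftRight_cast,
        Nat.shiftRight_add]
  · rw [toNat_form_neg x h, shiftRight_negSucc, shiftRight_negSucc, shiftRight_negSucc,
        Nat.shiftRight_add]

theorem bxor_zero_left (y : Int) : PySem.Int.bxor 0 y = y := by
  rw [PySem.Int.bxor_comm, PySem.Int.bxor_zero]

-- ===== VERDICT (by name: the statement is the Claim_ definition above) =====
theorem cal_check_sum_spec : Claim_equal_cal_check_sum := by
  intro x _
  unfold Spec_cal_check_sum cal_check_sum cal_check_sum_alt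
  rw [calLoop, calLoop, calLoop, calLoop, calLoop]
  norm_num
  simp only [bxor_zero_left, band15, shift_bxor, shift_add, nib_bxor, PySem.Int.bxor_natCast]
  norm_num
  simp [Nat.xor_assoc, Nat.xor_left_comm]
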